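-- pv_equiv track=rewrite | github.com/kenansolomon22-gecko/HueProcess | hueprocess.py | closet_matches
-- ===== SOURCE A (Python) =====
-- def closet_matches(field, value, inventory):
--     if not inventory or not value or value.lower() in ("none", "n/a", ""):
--         return False
--     val_lower = value.lower()
--     field_map = {
--         "suit": ["suits", "blazers", "trousers", "dresses", "blouses"],
--         "tie": ["ties"],
--         "shoes": ["shoes"],
--         "socks": ["socks"],
--         "accessories": ["cuff_links", "jewelry"],
--         "pocket_square": ["pocket_squares"],
--     }
--     keywords = [w for w in val_lower.split() if len(w) > 3]
--     for cat in field_map.get(field, []):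
--         for item in inventory.get(cat, []):
--             if any(kw in item.lower() for kw in keywords):
--                 return True
--     return False
-- ===== SOURCE B (Python) =====
-- def _cats(field):
--     if field == "suit":
--         return ["suits", "blazers", "trousers", "dresses", "blouses"]
--     if field == "tie":
--         return ["ties"]
--     if field == "shoes":
--         return ["shoes"]
--     if field == "socks":
--         return ["socks"]
--     if field == "accessories":
--         return ["cuff_links", "jewelry"]
--     if field == "pocket_square":
--         return ["pocket_squares"]
--     return []
--
--
-- def closet_matches(field, value, inventory):
--     v = value.lower()
--     if not inventory or v in ("", "none", "n/a"):
--         return False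
--     haystack = " ".join(
--         item for cat in _cats(field) for item in inventory.get(cat, [])
--     ).lower()
--     return any(kw in haystack for kw in v.split() if len(kw) > 3)
-- ===== Notes on version B (the rewrite author's own statement) =====
-- stated objective: alternative
-- what changed: The category x item x keyword nested scan with early returns becomes: field_map dict replaced by a conditional-chain helper, the empty-value test folded into the none/n-a membership guard, and one space-joined lowercase haystack of all relevant items scanned once per split word (safe because split() words contain no whitespace, so no match can cross a join boundary).
import Mathlib
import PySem

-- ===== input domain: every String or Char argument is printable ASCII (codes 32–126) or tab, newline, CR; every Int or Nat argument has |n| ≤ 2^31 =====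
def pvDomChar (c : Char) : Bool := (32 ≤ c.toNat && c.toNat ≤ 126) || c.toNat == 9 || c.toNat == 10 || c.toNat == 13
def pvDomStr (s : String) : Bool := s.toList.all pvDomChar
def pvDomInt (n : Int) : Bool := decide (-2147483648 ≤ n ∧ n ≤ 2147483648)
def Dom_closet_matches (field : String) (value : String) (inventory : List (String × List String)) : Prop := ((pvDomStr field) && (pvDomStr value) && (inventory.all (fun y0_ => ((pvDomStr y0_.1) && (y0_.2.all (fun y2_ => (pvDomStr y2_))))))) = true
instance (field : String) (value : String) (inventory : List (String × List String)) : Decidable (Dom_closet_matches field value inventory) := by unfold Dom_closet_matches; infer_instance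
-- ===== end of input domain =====

-- B folds the empty-value test into the "none"/"n/a" membership, replaces the field_map dict by a
-- plain conditional chain, and replaces the category×item×keyword nested scan by one space-joined
-- lowercase haystack scanned once per split word (objective: alternative decomposition, similar cost).

-- ===== PORT A =====
-- the literal field_map dict A constructs
def pvFieldMap : PySem.Dict String (List String) :=
  PySem.Dict.mk
    [("suit", ["suits", "blazers", "trousers", "dresses", "blouses"]),
     ("tie", ["ties"]),
     ("shoes", ["shoes"]),
     ("socks", ["socks"]),
     ("accessories", ["cuff_links", "jewelry"]),
     ("pocket_square", ["pocket_squares"])]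

def closet_matches (field : String) (value : String) (inventory : List (String × List String)) : Bool :=
  if inventory.isEmpty || value == "" ||
      (PySem.Str.lower value == "none" || PySem.Str.lower value == "n/a" || PySem.Str.lower value == "") then
    false
  else
    let val_lower := PySem.Str.lower value
    let keywords := (PySem.Str.split₀ val_lower).filter (fun w => 3 < PySem.Str.len w)
    (pvFieldMap.getD field []).any (fun cat =>
      ((PySem.Dict.mk inventory).getD cat []).any (fun item =>
        keywords.any (fun kw => PySem.Str.isIn kw (PySem.Str.lower item))))

-- ===== PORT B =====
-- B's _cats: the field_map as a conditional chain
def pvCats (field : String) : List String :=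
  if field == "suit" then ["suits", "blazers", "trousers", "dresses", "blouses"]
  else if field == "tie" then ["ties"]
  else if field == "shoes" then ["shoes"]
  else if field == "socks" then ["socks"]
  else if field == "accessories" then ["cuff_links", "jewelry"]
  else if field == "pocket_square" then ["pocket_squares"]
  else []

def closet_matches_alt (field : String) (value : String) (inventory : List (String × List String)) : Bool :=
  let v := PySem.Str.lower value
  if inventory.isEmpty || (v == "" || v == "none" || v == "n/a") then
    false
  else
    let haystack := PySem.Str.lower (PySem.Str.join " "
      ((pvCats field).flatMap (fun cat => (PySem.Dict.mk inventory).getD cat [])))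
    (PySem.Str.split₀ v).any (fun kw => 3 < PySem.Str.len kw && PySem.Str.isIn kw haystack)

-- ===== PRECONDITION & SPEC =====
def Spec_closet_matches (field : String) (value : String) (inventory : List (String × List String)) (out : Bool) : Prop := out = closet_matches_alt field value inventory
instance (field : String) (value : String) (inventory : List (String × List String)) (out : Bool) : Decidable (Spec_closet_matches field value inventory out) := by unfold Spec_closet_matches; infer_instance

-- ===== CLAIM =====
def Claim_equal_closet_matches : Prop := ∀ (field : String) (value : String) (inventory : List (String × List String)), Dom_closet_matches field value inventory → Spec_closet_matches field value inventory (closet_matches field value inventory)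

-- ===== LEMMAS AND PROOFS =====

-- A's field_map lookup agrees with B's conditional chain
theorem fieldMap_eq_cats (field : String) : pvFieldMap.getD field [] = pvCats field := by
  by_cases h1 : field = "suit"
  · subst h1; rfl
  by_cases h2 : field = "tie"
  · subst h2; rfl
  by_cases h3 : field = "shoes"
  · subst h3; rfl
  by_cases h4 : field = "socks"
  · subst h4; rfl
  by_cases h5 : field = "accessories"
  · subst h5; rfl
  by_cases h6 : field = "pocket_square"
  · subst h6; rfl
  have e1 : ("suit" == field) = false := beq_eq_false_iff_ne.mpr (Ne.symm h1)
  have e2 : ("tie" == field) = false := beq_eq_false_iff_ne.mpr (Ne.symm h2)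
  have e3 : ("shoes" == field) = false := beq_eq_false_iff_ne.mpr (Ne.symm h3)
  have e4 : ("socks" == field) = false := beq_eq_false_iff_ne.mpr (Ne.symm h4)
  have e5 : ("accessories" == field) = false := beq_eq_false_iff_ne.mpr (Ne.symm h5)
  have e6 : ("pocket_square" == field) = false := beq_eq_false_iff_ne.mpr (Ne.symm h6)
  have f1 : (field == "suit") = false := beq_eq_false_iff_ne.mpr h1
  have f2 : (field == "tie") = false := beq_eq_false_iff_ne.mpr h2
  have f3 : (field == "shoes") = false := beq_eq_false_iff_ne.mpr h3
  have f4 : (field == "socks") = false := beq_eq_false_iff_ne.mpr h4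
  have f5 : (field == "accessories") = false := beq_eq_false_iff_ne.mpr h5
  have f6 : (field == "pocket_square") = false := beq_eq_false_iff_ne.mpr h6
  unfold pvFieldMap pvCats
  simp [PySem.Dict.getD_eq_get?_getD, PySem.Dict.get?,
    e1, e2, e3, e4, e5, e6, f1, f2, f3, f4, f5, f6]

-- A's guard condition equals B's guard condition
theorem guard_eq (value : String) (inventory : List (String × List String)) :
    (inventory.isEmpty || value == "" ||
      (PySem.Str.lower value == "none" || PySem.Str.lower value == "n/a" || PySem.Str.lower value == "")) =
    (inventory.isEmpty || (PySem.Str.lower value == "" || PySem.Str.lower value == "none" ||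
      PySem.Str.lower value == "n/a")) := by
  by_cases hv : value = ""
  · subst hv
    rw [show PySem.Str.lower "" = "" from rfl]
    cases inventory.isEmpty <;> rfl
  · have : (value == "") = false := by simpa using hv
    rw [this]
    cases inventory.isEmpty <;> cases hl : PySem.Str.lower value == "none" <;>
      cases PySem.Str.lower value == "n/a" <;> cases PySem.Str.lower value == "" <;> rfl

-- every word produced by Python's str.split() is nonempty and contains no whitespace character
theorem split₀_go_no_space (s cur : List Char) (acc : List (List Char))
    (hcur : ∀ c ∈ cur, PySem.Chars.isspace c = false)
    (hacc : ∀ w ∈ acc, w ≠ [] ∧ ∀ c ∈ w, PySem.Chars.isspace c = false) :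
    ∀ w ∈ PySem.Chars.split₀.go s cur acc, w ≠ [] ∧ ∀ c ∈ w, PySem.Chars.isspace c = false := by
  induction s generalizing cur acc with
  | nil =>
    intro w hw
    unfold PySem.Chars.split₀.go at hw
    by_cases hc : cur.isEmpty
    · simp [hc] at hw; exact hacc w (by simpa using hw)
    · simp [hc, List.mem_reverse] at hw
      rcases hw with hw | hw
      · exact hacc w hw
      · subst hw
        refine ⟨by simpa [List.isEmpty_iff] using hc, ?_⟩
        intro c hc'; exact hcur c (by simpa using hc')
  | cons c rest ih =>
    intro w hw
    unfold PySem.Chars.split₀.go at hw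
    by_cases hs : PySem.Chars.isspace c
    · by_cases hc : cur.isEmpty
      · simp [hs, hc] at hw
        exact ih [] acc (by simp) hacc w hw
      · simp [hs, hc] at hw
        refine ih [] (cur.reverse :: acc) (by simp) ?_ w hw
        intro v hv
        rcases List.mem_cons.1 hv with hv | hv
        · subst hv
          exact ⟨by simpa [List.isEmpty_iff] using hc, fun d hd => hcur d (by simpa using hd)⟩
        · exact hacc v hv
    · simp [hs] at hw
      refine ih (c :: cur) acc ?_ hacc w hw
      intro d hd
      rcases List.mem_cons.1 hd with hd | hd
      · subst hd; simpa using hs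
      · exact hcur d hd

theorem split₀_no_space (s : List Char) :
    ∀ w ∈ PySem.Chars.split₀ s, w ≠ [] ∧ ∀ c ∈ w, PySem.Chars.isspace c = false :=
  split₀_go_no_space s [] [] (by simp) (by simp)

-- an infix containing no separator character cannot straddle the separator
theorem infix_append_sep (kw a b : List Char) (sep : Char) (hsp : sep ∉ kw) :
    kw <:+: (a ++ sep :: b) ↔ kw <:+: a ∨ kw <:+: b := by
  constructor
  · rintro ⟨s, t, h⟩
    have hlen : s.length + kw.length + t.length = a.length + 1 + b.length := by
      have := congrArg List.length h
      simp only [List.length_append, List.length_cons] at this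
      omega
    by_cases h1 : s.length + kw.length ≤ a.length
    · left
      have hpre : s ++ kw <+: a := by
        apply List.prefix_of_prefix_length_le (l₃ := a ++ sep :: b)
        · exact ⟨t, by simpa [List.append_assoc] using h⟩
        · exact List.prefix_append a (sep :: b)
        · simpa using h1
      obtain ⟨u, hu⟩ := hpre
      exact ⟨s, u, by simpa [List.append_assoc] using hu⟩
    · by_cases h2 : a.length + 1 ≤ s.length
      · right
        have hsuf : kw ++ t <:+ b := by
          apply List.suffix_of_suffix_length_le (l₃ := a ++ sep :: b)
          · exact ⟨s, by simpa [List.append_assoc] using h⟩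
          · exact ⟨a ++ [sep], by simp⟩
          · simp only [List.length_append]; omega
        obtain ⟨u, hu⟩ := hsuf
        exact ⟨u, t, by simpa [List.append_assoc] using hu⟩
      · exfalso
        have hs : s.length ≤ a.length := by omega
        have hlt : a.length - s.length < kw.length := by omega
        have htot : a.length < (s ++ (kw ++ t)).length := by
          simp only [List.length_append]; omega
        have e1 : (s ++ (kw ++ t))[a.length]'htot = sep := by
          have h' : s ++ (kw ++ t) = a ++ sep :: b := by simpa [List.append_assoc] using h
          rw [List.getElem_of_eq h' htot]
          simp [List.getElem_append_right (Nat.le_refl a.length)]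
        have e2 : (s ++ (kw ++ t))[a.length]'htot = kw[a.length - s.length]'hlt := by
          rw [List.getElem_append_right hs, List.getElem_append_left hlt]
        exact hsp (e1 ▸ e2 ▸ List.getElem_mem hlt)
  · rintro (h | h)
    · exact h.trans (List.prefix_append a (sep :: b)).isInfix
    · refine h.trans ?_
      exact ⟨a ++ [sep], [], by simp⟩

theorem intercalate_cons_cons (sep a b : List Char) (t : List (List Char)) :
    List.intercalate sep (a :: b :: t) = a ++ sep ++ List.intercalate sep (b :: t) := by
  simp [List.intercalate, List.intersperse]

-- a space-free nonempty needle occurs in the space-joined blob iff it occurs in one of the parts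
theorem infix_intercalate_space (kw : List Char) (hne : kw ≠ []) (hsp : (' ' : Char) ∉ kw)
    (parts : List (List Char)) :
    (kw <:+: List.intercalate [' '] parts) ↔ ∃ p ∈ parts, kw <:+: p := by
  induction parts with
  | nil =>
    simp [List.intercalate]
    intro h
    exact hne h
  | cons a t ih =>
    cases t with
    | nil => simp [List.intercalate]
    | cons b t' =>
      rw [intercalate_cons_cons]
      rw [List.append_assoc]
      have : ([' '] ++ List.intercalate [' '] (b :: t')) = ' ' :: List.intercalate [' '] (b :: t') := rfl
      rw [this, infix_append_sep kw _ _ _ hsp]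
      rw [ih]
      constructor
      · rintro (h | h)
        · exact ⟨a, by simp, h⟩
        · obtain ⟨p, hp, h⟩ := h; exact ⟨p, by simp [hp], h⟩
      · rintro ⟨p, hp, h⟩
        rcases List.mem_cons.1 hp with rfl | hp
        · exact Or.inl h
        · exact Or.inr ⟨p, hp, h⟩

theorem lower_intercalate_space (parts : List (List Char)) :
    PySem.Chars.lower (List.intercalate [' '] parts) =
      List.intercalate [' '] (parts.map PySem.Chars.lower) := by
  induction parts with
  | nil => simp [List.intercalate, PySem.Chars.lower]
  | cons a t ih =>
    cases t with
    | nil => simp [List.intercalate, PySem.Chars.lower]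
    | cons b t' =>
      rw [intercalate_cons_cons, List.map_cons, List.map_cons,
        intercalate_cons_cons (t := t'.map PySem.Chars.lower), ← List.map_cons, ← ih]
      simp [PySem.Chars.lower, PySem.Chars.lowerChar]
      decide

theorem chars_isIn_join (kw : List Char) (hne : kw ≠ []) (hsp : (' ' : Char) ∉ kw)
    (L : List (List Char)) :
    PySem.Chars.isIn kw (PySem.Chars.lower (PySem.Chars.join [' '] L)) =
      L.any (fun item => PySem.Chars.isIn kw (PySem.Chars.lower item)) := by
  rw [Bool.eq_iff_iff]
  have hj : PySem.Chars.join [' '] L = List.intercalate [' '] L := rfl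
  rw [hj, lower_intercalate_space, PySem.Chars.isIn_iff_infix,
    infix_intercalate_space kw hne hsp]
  simp only [List.any_eq_true, PySem.Chars.isIn_iff_infix, List.mem_map]
  constructor
  · rintro ⟨p, ⟨item, hi, rfl⟩, h⟩; exact ⟨item, hi, h⟩
  · rintro ⟨item, hi, h⟩; exact ⟨_, ⟨item, hi, rfl⟩, h⟩

theorem str_isIn_join (kw : String) (hne : kw.toList ≠ []) (hsp : (' ' : Char) ∉ kw.toList)
    (L : List String) :
    PySem.Str.isIn kw (PySem.Str.lower (PySem.Str.join " " L)) =
      L.any (fun item => PySem.Str.isIn kw (PySem.Str.lower item)) := by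
  rw [PySem.Str.isIn_eq, PySem.Str.toList_lower, PySem.Str.toList_join]
  have hsep : (" " : String).toList = [' '] := rfl
  rw [hsep, chars_isIn_join kw.toList hne hsp, List.any_map]
  congr 1
  funext item
  simp [Function.comp, PySem.Str.isIn_eq, PySem.Str.toList_lower]

-- the nested category×item×keyword scan equals the keyword scan over the joined blob
theorem core_scan (kws : List String)
    (hk : ∀ w ∈ kws, w.toList ≠ [] ∧ (' ' : Char) ∉ w.toList)
    (cats : List String) (f : String → List String) :
    cats.any (fun cat => (f cat).any (fun item =>
        kws.any (fun kw => PySem.Str.isIn kw (PySem.Str.lower item)))) =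
      kws.any (fun kw =>
        PySem.Str.isIn kw (PySem.Str.lower (PySem.Str.join " " (cats.flatMap f)))) := by
  rw [Bool.eq_iff_iff]
  simp only [List.any_eq_true]
  constructor
  · rintro ⟨cat, hcat, item, hitem, kw, hkw, hin⟩
    obtain ⟨hne, hsp⟩ := hk kw hkw
    refine ⟨kw, hkw, ?_⟩
    rw [str_isIn_join kw hne hsp]
    exact List.any_eq_true.2 ⟨item, List.mem_flatMap.2 ⟨cat, hcat, hitem⟩, hin⟩
  · rintro ⟨kw, hkw, hin⟩
    obtain ⟨hne, hsp⟩ := hk kw hkw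
    rw [str_isIn_join kw hne hsp] at hin
    obtain ⟨item, hmem, h⟩ := List.any_eq_true.1 hin
    obtain ⟨cat, hcat, hitem⟩ := List.mem_flatMap.1 hmem
    exact ⟨cat, hcat, item, hitem, kw, hkw, h⟩

-- ===== VERDICT (by name: the statement is the Claim_ definition above) =====
theorem closet_matches_spec : Claim_equal_closet_matches := by
  intro field value inventory _
  unfold Spec_closet_matches closet_matches closet_matches_alt
  dsimp only
  rw [guard_eq]
  split_ifs with h
  · rfl
  · have hk : ∀ w ∈ (PySem.Str.split₀ (PySem.Str.lower value)).filter
        (fun w => 3 < PySem.Str.len w), w.toList ≠ [] ∧ (' ' : Char) ∉ w.toList := by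
      intro w hw
      have hw' : w.toList ∈ PySem.Chars.split₀ (PySem.Str.lower value).toList := by
        rw [← PySem.Str.split₀_map_toList]
        exact List.mem_map_of_mem (List.mem_filter.1 hw).1
      obtain ⟨hne, hns⟩ := split₀_no_space _ _ hw'
      refine ⟨hne, fun hmem => ?_⟩
      have := hns ' ' hmem
      simp [PySem.Chars.isspace] at this
    rw [fieldMap_eq_cats, core_scan _ hk _ _, List.any_filter]
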